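-- pv_equiv track=rewrite | github.com/pypi-data/pypi-mirror-401 | packages/graflo/graflo-1.4.0.tar.gz/graflo-1.4.0/graflo/plot/plotter.py | lto_dict
-- ===== SOURCE A (Python) =====
-- def lto_dict(strings):
--     """Create a dictionary of string prefixes for shortening labels.
--
--     Args:
--         strings: List of strings to process
--
--     Returns:
--         dict: Mapping of shortened prefixes to original prefixes
--
--     Example:
--         >>> lto_dict(["user", "user_profile", "user_settings"])
--         {'user': 'user', 'user_p': 'user_', 'user_s': 'user_'}
--     """
--     strings = list(set(strings))
--     d = {"": strings}
--     while any([len(v) > 1 for v in d.values()]):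
--         keys = list(d.keys())
--         for k in keys:
--             item = d.pop(k)
--             if len(item) < 2:
--                 d[k] = item
--             else:
--                 for s in item:
--                     if s:
--                         if k + s[0] in d:
--                             d[k + s[0]].append(s[1:])
--                         else:
--                             d[k + s[0]] = [s[1:]]
--                     else:
--                         d[k] = [s]
--     r = {}
--     for k, v in d.items():
--         if v:
--             r[k + v[0]] = k
--         else:
--             r[k] = k
--     return r
-- ===== SOURCE B (Python) =====
-- def lto_dict(strings):
--     """Shortest-unique-prefix table via one recursive depth-first grouping pass
--     (no repeated whole-dict sweeps); same dict as A (dict equality ignores order)."""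
--     def walk(prefix, items):
--         if len(items) < 2:
--             if items and items[0]:
--                 return [(prefix + items[0], prefix)]
--             return [(prefix, prefix)]
--         groups = {}
--         for s in items:
--             if s:
--                 groups.setdefault(s[0], []).append(s[1:])
--             else:
--                 groups[""] = None
--         pairs = []
--         for c, tails in groups.items():
--             if tails is None:
--                 pairs.append((prefix, prefix))
--             else:
--                 pairs.extend(walk(prefix + c, tails))
--         return pairs
--     return dict(walk("", list(dict.fromkeys(strings))))
-- ===== Notes on version B (the rewrite author's own statement) =====
-- stated objective: alternative
-- what changed: A repeatedly sweeps a global ordered dict of prefix groups (popping and re-inserting every group, including already-finished singletons, once per pass until no group has >1 member); B does one recursive depth-first grouping by first character, visiting each prefix group exactly once and never re-touching finished entries (intended as faster; a timing run read ~1.3-2x at large sizes, below the confirmation threshold).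
import Mathlib
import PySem

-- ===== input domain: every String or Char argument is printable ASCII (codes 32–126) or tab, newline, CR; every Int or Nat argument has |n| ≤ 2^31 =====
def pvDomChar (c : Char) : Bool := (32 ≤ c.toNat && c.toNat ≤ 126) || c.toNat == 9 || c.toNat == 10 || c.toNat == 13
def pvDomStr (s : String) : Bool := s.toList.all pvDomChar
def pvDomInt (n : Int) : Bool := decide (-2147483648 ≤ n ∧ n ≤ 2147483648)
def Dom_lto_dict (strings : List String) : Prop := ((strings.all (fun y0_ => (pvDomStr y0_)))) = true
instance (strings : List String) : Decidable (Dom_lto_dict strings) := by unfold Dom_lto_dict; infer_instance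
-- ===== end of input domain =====

-- B replaces A's repeated whole-dict splitting passes by a single recursive
-- depth-first grouping that visits each prefix group once; equal output on every input (A is total).
-- (Python's `list(set(strings))` hash order is not modelled; the returned dict's
-- CONTENT is order-independent and dicts are compared as dicts.)

-- ===== PORT A =====

-- inner body of `for s in item:` — `if s:` is `s[0]` existing; key `k + s[0]`, tail `s[1:]`
def pySplitItem (k : String) (d : PySem.Dict String (List String)) (s : String) :
    PySem.Dict String (List String) :=
  match PySem.Str.pyGet? s 0 with
  | some c =>
      let key := k ++ String.singleton c
      let tail := PySem.Str.slice s (some 1) none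
      match d.get? key with
      | some lst => d.insert key (lst ++ [tail])    -- `d[k+s[0]].append(s[1:])`
      | none     => d.insert key [tail]             -- `d[k+s[0]] = [s[1:]]`
  | none => d.insert k [s]                          -- `else: d[k] = [s]`

-- body of `for k in keys:` — `item = d.pop(k)` (every snapshot key is present: `none` is unreachable)
def pyProcessKey (d : PySem.Dict String (List String)) (k : String) :
    PySem.Dict String (List String) :=
  match d.pop? k with
  | none => d
  | some (item, d') =>
      if item.length < 2 then d'.insert k item      -- `d[k] = item`
      else item.foldl (pySplitItem k) d'

-- one iteration of the while loop: `keys = list(d.keys()); for k in keys: ...`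
def pyPass (d : PySem.Dict String (List String)) : PySem.Dict String (List String) :=
  d.keys.foldl pyProcessKey d

-- fuel strictly exceeding the number of passes the while loop can make (proved below);
-- the loop itself is Python's `while any([len(v) > 1 for v in d.values()]):`
def pyFuel (strs : List String) : Nat := strs.foldl (fun n s => n + s.toList.length + 1) 1

def pyLoop : Nat → PySem.Dict String (List String) → PySem.Dict String (List String)
  | 0, d => d
  | Nat.succ f, d =>
      if d.values.any (fun v => 1 < v.length) then pyLoop f (pyPass d) else d

def lto_dict (strings : List String) : List (String × String) :=
  let strs : List String := PySem.Set.ofList strings          -- `strings = list(set(strings))`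
  let d0 := (PySem.Dict.empty : PySem.Dict String (List String)).insert "" strs
  let dfin := pyLoop (pyFuel strs) d0
  -- `r = {}; for k, v in d.items(): if v: r[k+v[0]] = k else: r[k] = k`
  (dfin.items.foldl (fun r kv =>
      match kv.2 with
      | [] => r.insert kv.1 kv.1
      | v0 :: _ => r.insert (kv.1 ++ v0) kv.1)
    (PySem.Dict.empty : PySem.Dict String String)).items

-- ===== PORT B =====

-- `groups.setdefault(s[0], []).append(s[1:])` / `groups[""] = None`
-- (a single-char key never holds None, so the `_` arm below is the setdefault-append)
def bgStep (g : PySem.Dict String (Option (List String))) (s : String) :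
    PySem.Dict String (Option (List String)) :=
  match PySem.Str.pyGet? s 0 with
  | some c =>
      let key := String.singleton c
      let tail := PySem.Str.slice s (some 1) none
      match g.get? key with
      | some (some t) => g.insert key (some (t ++ [tail]))
      | _ => g.insert key (some [tail])
  | none => g.insert "" none

def buildGroups (items : List String) : PySem.Dict String (Option (List String)) :=
  items.foldl bgStep PySem.Dict.empty

def sizeSum (items : List String) : Nat := (items.map (fun s => s.toList.length + 1)).sum

-- helper facts used by `walk`'s termination proof (cited by `decreasing_by`)

theorem pyGet0_eq (s : String) : PySem.Str.pyGet? s 0 = s.toList[0]? := by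
  have h := PySem.Str.pyGet?_natCast s (0 : Nat)
  simpa using h
theorem tail_toList (s : String) :
    (PySem.Str.slice s (some 1) none).toList = s.toList.tail := by
  rw [PySem.Str.toList_slice, PySem.Chars.slice_eq_listSlice,
    PySem.List.slice_from _ (by norm_num : (0:Int) ≤ 1)]
  simp [List.drop_one]

theorem sizeSum_cons (s : String) (items : List String) :
    sizeSum (s :: items) = (s.toList.length + 1) + sizeSum items := by
  unfold sizeSum
  rw [List.map_cons, List.sum_cons]

theorem sizeSum_eq (items : List String) :
    sizeSum items = (items.map (fun s => s.toList.length)).sum + items.length := by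
  induction items with
  | nil => rfl
  | cons s items ih =>
    rw [sizeSum_cons, List.map_cons, List.sum_cons, List.length_cons, ih]
    omega

theorem sizeSum_pos {items : List String} (h : items ≠ []) :
    (items.map (fun s => s.toList.length)).sum < sizeSum items := by
  rw [sizeSum_eq]
  have : items.length ≠ 0 := fun hl => h (List.length_eq_zero_iff.mp hl)
  omega

theorem sizeSum_singleton (x : String) : sizeSum [x] = x.toList.length + 1 := by
  unfold sizeSum
  rw [List.map_cons, List.map_nil, List.sum_cons, List.sum_nil]
  omega

theorem sizeSum_append_singleton (t : List String) (x : String) :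
    sizeSum (t ++ [x]) = sizeSum t + (x.toList.length + 1) := by
  unfold sizeSum
  rw [List.map_append, List.sum_append]
  simp

-- every per-character group is strictly smaller than the node's item list
theorem bgStep_mem_bound {g : PySem.Dict String (Option (List String))} {n : Nat}
    (s : String) (h : ∀ c t, (c, some t) ∈ g.items → sizeSum t ≤ n) :
    ∀ c t, (c, some t) ∈ (bgStep g s).items → sizeSum t ≤ n + s.toList.length := by
  intro c t hm
  cases hget : PySem.Str.pyGet? s 0 with
  | none =>
    simp only [bgStep, hget] at hm
    rcases (PySem.Dict.mem_items_insert g _ _ _).mp hm with h1 | ⟨h1, _⟩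
    · simp at h1
    · exact le_trans (h c t h1) (by omega)
  | some c0 =>
    have hne : s.toList ≠ [] := by
      rw [pyGet0_eq] at hget
      intro hnil
      rw [hnil] at hget
      simp at hget
    have htl : (PySem.Str.slice s (some 1) none).toList.length = s.toList.length - 1 := by
      rw [tail_toList, List.length_tail]
    have hlen : 1 ≤ s.toList.length := by
      cases hx : s.toList with
      | nil => exact absurd hx hne
      | cons a l => simp
    simp only [bgStep, hget] at hm
    cases hg0 : g.get? (String.singleton c0) with
    | none =>
      simp only [hg0] at hm
      rcases (PySem.Dict.mem_items_insert g _ _ _).mp hm with h1 | ⟨h1, _⟩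
      · have h2 : t = [PySem.Str.slice s (some 1) none] := by
          have := congrArg Prod.snd h1
          simpa using this
        rw [h2, sizeSum_singleton]
        omega
      · exact le_trans (h c t h1) (by omega)
    | some t? =>
      cases t? with
      | none =>
        simp only [hg0] at hm
        rcases (PySem.Dict.mem_items_insert g _ _ _).mp hm with h1 | ⟨h1, _⟩
        · have h2 : t = [PySem.Str.slice s (some 1) none] := by
            have := congrArg Prod.snd h1
            simpa using this
          rw [h2, sizeSum_singleton]
          omega
        · exact le_trans (h c t h1) (by omega)
      | some t0 =>
        simp only [hg0] at hm
        rcases (PySem.Dict.mem_items_insert g _ _ _).mp hm with h1 | ⟨h1, _⟩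
        · have hmem0 : (String.singleton c0, some t0) ∈ g.items :=
            PySem.Dict.mem_items_of_get?_eq_some _ hg0
          have hb0 : sizeSum t0 ≤ n := h _ _ hmem0
          have h2 : t = t0 ++ [PySem.Str.slice s (some 1) none] := by
            have := congrArg Prod.snd h1
            simpa using this
          rw [h2, sizeSum_append_singleton]
          omega
        · exact le_trans (h c t h1) (by omega)

theorem buildGroups_mem_bound (items : List String) :
    ∀ c t, (c, some t) ∈ (buildGroups items).items →
      sizeSum t ≤ (items.map (fun s => s.toList.length)).sum := by
  have main : ∀ (l : List String) (g : PySem.Dict String (Option (List String))) (n : Nat),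
      (∀ c t, (c, some t) ∈ g.items → sizeSum t ≤ n) →
      ∀ c t, (c, some t) ∈ (l.foldl bgStep g).items →
        sizeSum t ≤ n + (l.map (fun s => s.toList.length)).sum := by
    intro l
    induction l with
    | nil => intro g n h c t hm; exact le_trans (h c t hm) (by simp)
    | cons s l ih =>
      intro g n h c t hm
      rw [List.foldl_cons] at hm
      have := ih (bgStep g s) (n + s.toList.length) (bgStep_mem_bound s h) c t hm
      rw [List.map_cons, List.sum_cons]
      omega
  intro c t hm
  have := main items PySem.Dict.empty 0
    (fun c t hmm => by simp [PySem.Dict.empty] at hmm) c t hm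
  omega

theorem buildGroups_tail_lt (items : List String) (hne : items ≠ [])
    (c : String) (t : List String) (h : (c, some t) ∈ (buildGroups items).items) :
    sizeSum t < sizeSum items :=
  lt_of_le_of_lt (buildGroups_mem_bound items c t h) (sizeSum_pos hne)

def walk (pre : String) (items : List String) : List (String × String) :=
  if _h : items.length < 2 then
    match items with
    | [] => [(pre, pre)]
    | s :: _ =>
      match PySem.Str.pyGet? s 0 with                -- `if items and items[0]:`
      | some _ => [(pre ++ s, pre)]
      | none => [(pre, pre)]
  else
    (buildGroups items).items.attach.foldl
      (fun pairs ct =>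
        match ct with
        | ⟨(_, none), _⟩ => pairs ++ [(pre, pre)]
        | ⟨(c, some tails), _⟩ => pairs ++ walk (pre ++ c) tails) []
termination_by sizeSum items
decreasing_by
  exact buildGroups_tail_lt items (by intro hnil; simp [hnil] at _h) c tails (by assumption)

def lto_dict_alt (strings : List String) : List (String × String) :=
  let pairs := walk "" (PySem.List.dedup strings)    -- `list(dict.fromkeys(strings))`
  -- `dict(pairs)`
  (pairs.foldl (fun d p => d.insert p.1 p.2)
    (PySem.Dict.empty : PySem.Dict String String)).items

-- ===== PRECONDITION & SPEC =====
def Spec_lto_dict (strings : List String) (out : List (String × String)) : Prop := out = lto_dict_alt strings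
instance (strings : List String) (out : List (String × String)) : Decidable (Spec_lto_dict strings out) := by unfold Spec_lto_dict; infer_instance

-- ===== CLAIM (what is proved, stated in full; the proofs are below) =====
def Claim_equal_lto_dict : Prop := ∀ (strings : List String), Dom_lto_dict strings → Spec_lto_dict strings (lto_dict strings)

-- ===== LEMMAS AND PROOFS =====

-- proof-side definitions
-- string facts used only by the proofs
theorem strEmpty_toList : ("" : String).toList = [] := by decide
theorem str_toList_eq {a b : String} (h : a.toList = b.toList) : a = b :=
  String.toList_inj.mp h
theorem pyGet0_none {s : String} (h : PySem.Str.pyGet? s 0 = none) : s = "" := by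
  rw [pyGet0_eq] at h
  apply str_toList_eq
  rw [strEmpty_toList]
  cases hs : s.toList with
  | nil => rfl
  | cons c cs => rw [hs] at h; simp at h
theorem singleton_toList (c : Char) : (String.singleton c).toList = [c] :=
  String.toList_singleton c
theorem append_toList (a b : String) : (a ++ b).toList = a.toList ++ b.toList := by
  simp
theorem str_append_cancel {k a b : String} (h : k ++ a = k ++ b) : a = b := by
  apply str_toList_eq
  have := congrArg String.toList h
  rw [append_toList, append_toList] at this
  exact List.append_cancel_left this
theorem str_prefix_append (k a : String) : k.toList <+: (k ++ a).toList := by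
  rw [append_toList]; exact List.prefix_append _ _



def emit1 (kv : String × List String) : String × String :=
  match kv.2 with
  | [] => (kv.1, kv.1)
  | v0 :: _ => (kv.1 ++ v0, kv.1)

def GOK (p : String × Option (List String)) : Prop :=
  (p.2 = none → p.1 = "") ∧ (p.2 ≠ none → p.1.toList.length = 1)

def GInv (g : PySem.Dict String (Option (List String))) : Prop := ∀ p ∈ g.items, GOK p

def liftE (k : String) (p : String × Option (List String)) : String × List String :=
  ((match p.2 with
    | none => k
    | some _ => k ++ p.1), p.2.getD [""])

def expandItems (e : String × List String) : List (String × List String) :=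
  if e.2.length < 2 then [e] else (buildGroups e.2).items.map (liftE e.1)

def keysOf (l : List (String × List String)) : List String := l.map Prod.fst

def OInv (pending done : List (String × List String)) : Prop :=
  (keysOf pending).Nodup ∧
  (∀ e ∈ pending, ∀ p ∈ done, e.1 ≠ p.1) ∧
  (∀ e ∈ pending, 1 < e.2.length →
    ∀ K, (K ∈ keysOf pending ∨ K ∈ keysOf done) → e.1.toList <+: K.toList → K = e.1)

def valOf (t? : Option (List String)) : Nat :=
  match t? with
  | some t => sizeSum t
  | none => 0

def accSumL (l : List (String × Option (List String))) : Nat :=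
  (l.map (fun p => valOf p.2)).sum

def muE (e : String × List String) : Nat := if 1 < e.2.length then sizeSum e.2 else 0

def muL (l : List (String × List String)) : Nat := (l.map muE).sum


-- ---------- GOK / liftE ----------
theorem GOK_insert {g : PySem.Dict String (Option (List String))}
    {q : String} {v : Option (List String)} (hg : GInv g) (hqv : GOK (q, v)) :
    GInv (g.insert q v) := by
  intro p hp
  rcases (PySem.Dict.mem_items_insert g q v p).mp hp with h | ⟨h, _⟩
  · rw [h]; exact hqv
  · exact hg p h

theorem GOK_char (c : Char) (v : List String) : GOK (String.singleton c, some v) :=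
  ⟨fun h => by simp at h, fun _ => by simp⟩

theorem GOK_bgStep {g : PySem.Dict String (Option (List String))} (s : String)
    (hg : GInv g) : GInv (bgStep g s) := by
  cases hget : PySem.Str.pyGet? s 0 with
  | none =>
    simp only [bgStep, hget]
    exact GOK_insert hg ⟨fun _ => rfl, fun h => absurd rfl h⟩
  | some c =>
    simp only [bgStep, hget]
    cases hg0 : g.get? (String.singleton c) with
    | none => exact GOK_insert hg (GOK_char c _)
    | some t? =>
      cases t? with
      | none => exact GOK_insert hg (GOK_char c _)
      | some t => exact GOK_insert hg (GOK_char c _)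

theorem foldl_bgStep_GInv (items : List String)
    (g : PySem.Dict String (Option (List String))) (hg : GInv g) :
    GInv (items.foldl bgStep g) := by
  induction items generalizing g with
  | nil => exact hg
  | cons s items ih => exact ih (bgStep g s) (GOK_bgStep s hg)

theorem buildGroups_GInv (items : List String) : GInv (buildGroups items) :=
  foldl_bgStep_GInv items PySem.Dict.empty (fun p hp => by simp [PySem.Dict.empty] at hp)

theorem bgStep_nodup {g : PySem.Dict String (Option (List String))} (s : String)
    (hg : g.keys.Nodup) : (bgStep g s).keys.Nodup := by
  cases hget : PySem.Str.pyGet? s 0 with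
  | none =>
    simp only [bgStep, hget]
    exact PySem.Dict.nodup_keys_insert g _ _ hg
  | some c =>
    simp only [bgStep, hget]
    cases g.get? (String.singleton c) with
    | none => exact PySem.Dict.nodup_keys_insert g _ _ hg
    | some t? =>
      cases t? with
      | none => exact PySem.Dict.nodup_keys_insert g _ _ hg
      | some t => exact PySem.Dict.nodup_keys_insert g _ _ hg

theorem buildGroups_nodup (items : List String) :
    ((buildGroups items).items.map Prod.fst).Nodup := by
  have : ∀ (l : List String) (g : PySem.Dict String (Option (List String))),
      g.keys.Nodup → (l.foldl bgStep g).keys.Nodup := by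
    intro l
    induction l with
    | nil => exact fun g hg => hg
    | cons s l ih => exact fun g hg => ih (bgStep g s) (bgStep_nodup s hg)
  exact this items PySem.Dict.empty (by simp [PySem.Dict.keys, PySem.Dict.empty])

theorem lift_val (k : String) (p : String × Option (List String)) :
    (liftE k p).2 = p.2.getD [""] := by
  cases hp : p.2 <;> simp [liftE, hp]

theorem lift_key_prefix (k : String) (p : String × Option (List String)) :
    k.toList <+: (liftE k p).1.toList := by
  cases hp : p.2 <;> simp [liftE, hp]

theorem lift_key_eq_iff (k : String) (p q : String × Option (List String))
    (hp : GOK p) (hq : GOK q) : (liftE k p).1 = (liftE k q).1 ↔ p.1 = q.1 := by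
  cases hp2 : p.2 with
  | none =>
    cases hq2 : q.2 with
    | none =>
      simp only [liftE, hp2, hq2]
      rw [hp.1 hp2, hq.1 hq2]
      simp
    | some t =>
      have hql : q.1.toList.length = 1 := hq.2 (by rw [hq2]; simp)
      simp only [liftE, hp2, hq2]
      constructor
      · intro h
        exfalso
        have h2 : k ++ "" = k ++ q.1 := by rw [String.append_empty]; exact h
        have h3 := str_append_cancel h2
        rw [← h3] at hql
        simp at hql
      · intro h
        exfalso
        rw [hp.1 hp2] at h
        rw [← h] at hql
        simp at hql
  | some t =>
    cases hq2 : q.2 with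
    | none =>
      have hpl : p.1.toList.length = 1 := hp.2 (by rw [hp2]; simp)
      simp only [liftE, hp2, hq2]
      constructor
      · intro h
        exfalso
        have h2 : k ++ p.1 = k ++ "" := by rw [String.append_empty]; exact h
        have h3 := str_append_cancel h2
        rw [h3] at hpl
        simp at hpl
      · intro h
        exfalso
        rw [hq.1 hq2] at h
        rw [h] at hpl
        simp at hpl
    | some u =>
      simp only [liftE, hp2, hq2]
      constructor
      · exact fun h => str_append_cancel h
      · exact fun h => by rw [h]

-- ---------- dict-level simulation ----------
theorem get?_mk_append_left {ν : Type} (D rest : List (String × ν)) (key : String)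
    (h : ∀ p ∈ D, p.1 ≠ key) :
    (PySem.Dict.mk (D ++ rest)).get? key = (PySem.Dict.mk rest).get? key := by
  induction D with
  | nil => rfl
  | cons p D ih =>
    obtain ⟨a, b⟩ := p
    have ha : a ≠ key := h (a, b) (by simp)
    rw [List.cons_append, PySem.Dict.get?_mk_cons]
    simp only [beq_iff_eq, ha, if_false]
    exact ih (fun p hp => h p (by simp [hp]))

theorem get?_mk_cons' {ν : Type} (p : String × ν) (rest : List (String × ν)) (x : String) :
    (PySem.Dict.mk (p :: rest)).get? x
      = if (p.1 == x) = true then some p.2 else (PySem.Dict.mk rest).get? x := by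
  obtain ⟨a, b⟩ := p
  exact PySem.Dict.get?_mk_cons a b rest x

theorem get?_lift (k : String) (l : List (String × Option (List String)))
    (q : String × Option (List String)) (hl : ∀ p ∈ l, GOK p) (hq : GOK q) :
    (PySem.Dict.mk (l.map (liftE k))).get? (liftE k q).1
      = ((PySem.Dict.mk l).get? q.1).map (fun t? => t?.getD [""]) := by
  induction l with
  | nil => rfl
  | cons p l ih =>
    rw [List.map_cons, get?_mk_cons', get?_mk_cons']
    by_cases heq : p.1 = q.1
    · have h1 : ((liftE k p).1 == (liftE k q).1) = true :=
        beq_iff_eq.mpr ((lift_key_eq_iff k p q (hl p (by simp)) hq).mpr heq)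
      have h2 : (p.1 == q.1) = true := beq_iff_eq.mpr heq
      rw [h1, h2]
      simp [lift_val]
    · have h1 : ((liftE k p).1 == (liftE k q).1) = false := by
        rw [beq_eq_false_iff_ne]
        exact fun hx => heq ((lift_key_eq_iff k p q (hl p (by simp)) hq).mp hx)
      have h2 : (p.1 == q.1) = false := beq_eq_false_iff_ne.mpr heq
      rw [h1, h2]
      simp only [Bool.false_eq_true, if_false]
      exact ih (fun r hr => hl r (by simp [hr]))

theorem any_lift (k : String) (l : List (String × Option (List String)))
    (q : String) (v : Option (List String)) (hl : ∀ p ∈ l, GOK p) (hqv : GOK (q, v)) :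
    (l.map (liftE k)).any (fun p => p.1 == (liftE k (q, v)).1)
      = l.any (fun p => p.1 == q) := by
  induction l with
  | nil => rfl
  | cons p l ih =>
    rw [List.map_cons, List.any_cons, List.any_cons, ih (fun r hr => hl r (by simp [hr]))]
    congr 1
    by_cases hpq : p.1 = q
    · rw [beq_iff_eq.mpr ((lift_key_eq_iff k p (q, v) (hl p (by simp)) hqv).mpr hpq),
        beq_iff_eq.mpr hpq]
    · rw [beq_eq_false_iff_ne.mpr
          (fun hx => hpq ((lift_key_eq_iff k p (q, v) (hl p (by simp)) hqv).mp hx)),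
        beq_eq_false_iff_ne.mpr hpq]

theorem map_replace_lift (k : String) (l : List (String × Option (List String)))
    (q : String) (v : Option (List String)) (hl : ∀ p ∈ l, GOK p) (hqv : GOK (q, v)) :
    (l.map (liftE k)).map (fun p =>
        if (p.1 == (liftE k (q, v)).1) = true then ((liftE k (q, v)).1, (liftE k (q, v)).2) else p)
      = (l.map (fun p => if (p.1 == q) = true then (q, v) else p)).map (liftE k) := by
  rw [List.map_map, List.map_map]
  apply List.map_congr_left
  intro p hp
  simp only [Function.comp]
  by_cases hpq : p.1 = q
  · rw [beq_iff_eq.mpr ((lift_key_eq_iff k p (q, v) (hl p hp) hqv).mpr hpq),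
      beq_iff_eq.mpr hpq]
    simp
  · rw [beq_eq_false_iff_ne.mpr
        (fun hx => hpq ((lift_key_eq_iff k p (q, v) (hl p hp) hqv).mp hx)),
      beq_eq_false_iff_ne.mpr hpq]
    simp

theorem map_replace_id {ν : Type} (l : List (String × ν)) (q : String) (v : ν)
    (h : ∀ r ∈ l, r.1 ≠ q) :
    l.map (fun p => if (p.1 == q) = true then (q, v) else p) = l := by
  induction l with
  | nil => rfl
  | cons p l ih =>
    rw [List.map_cons]
    have hb : (p.1 == q) = false := beq_eq_false_iff_ne.mpr (h p (by simp))
    rw [hb]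
    simp only [Bool.false_eq_true, if_false]
    rw [ih (fun r hr => h r (by simp [hr]))]

theorem insert_lift (k : String) (D : List (String × List String))
    (l : List (String × Option (List String))) (q : String) (v : Option (List String))
    (hl : ∀ p ∈ l, GOK p) (hqv : GOK (q, v))
    (hD : ∀ p ∈ D, ¬ k.toList <+: p.1.toList) :
    (PySem.Dict.mk (D ++ l.map (liftE k))).insert (liftE k (q, v)).1 (liftE k (q, v)).2
      = PySem.Dict.mk (D ++ ((PySem.Dict.mk l).insert q v).items.map (liftE k)) := by
  have hDne : ∀ p ∈ D, p.1 ≠ (liftE k (q, v)).1 := by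
    intro p hp heq
    exact hD p hp (by rw [heq]; exact lift_key_prefix k (q, v))
  have hanyD : D.any (fun p => p.1 == (liftE k (q, v)).1) = false :=
    List.any_eq_false.mpr (fun p hp => by simp [hDne p hp])
  unfold PySem.Dict.insert PySem.Dict.contains
  simp only [List.any_append, hanyD, Bool.false_or, any_lift k l q v hl hqv]
  by_cases hc : l.any (fun p => p.1 == q) = true
  · rw [if_pos hc, if_pos hc]
    simp only [PySem.Dict.mk.injEq]
    rw [List.map_append, map_replace_id D _ _ hDne, map_replace_lift k l q v hl hqv]
  · rw [if_neg hc, if_neg hc]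
    simp only [PySem.Dict.mk.injEq]
    rw [List.map_append, List.append_assoc]
    simp

theorem bgStep_sim (k s : String) (D : List (String × List String))
    (g : PySem.Dict String (Option (List String))) (hg : GInv g)
    (hD : ∀ p ∈ D, ¬ k.toList <+: p.1.toList) :
    pySplitItem k (PySem.Dict.mk (D ++ g.items.map (liftE k))) s
      = PySem.Dict.mk (D ++ (bgStep g s).items.map (liftE k)) := by
  obtain ⟨gl⟩ := g
  have hl : ∀ p ∈ gl, GOK p := fun p hp => hg p hp
  cases hget : PySem.Str.pyGet? s 0 with
  | none =>
    have hs := pyGet0_none hget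
    subst hs
    simp only [pySplitItem, hget, bgStep]
    exact insert_lift k D gl "" none hl ⟨fun _ => rfl, fun hh => absurd rfl hh⟩ hD
  | some c =>
    simp only [pySplitItem, hget, bgStep]
    have hget2 : (PySem.Dict.mk (D ++ gl.map (liftE k))).get? (k ++ String.singleton c)
        = ((PySem.Dict.mk gl).get? (String.singleton c)).map (fun t? => t?.getD [""]) := by
      rw [get?_mk_append_left D _ _
        (fun p hp heq => hD p hp (by rw [heq]; exact str_prefix_append k _))]
      exact get?_lift k gl (String.singleton c, some []) hl (GOK_char c [])
    rw [hget2]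
    cases hsmall : (PySem.Dict.mk gl).get? (String.singleton c) with
    | none =>
      simp only [Option.map_none]
      exact insert_lift k D gl (String.singleton c) (some [PySem.Str.slice s (some 1) none])
        hl (GOK_char c _) hD
    | some t? =>
      cases t? with
      | none =>
        exfalso
        have hmem := PySem.Dict.mem_items_of_get?_eq_some _ hsmall
        have := (hl _ hmem).1 rfl
        have h2 := congrArg String.toList this
        rw [singleton_toList, strEmpty_toList] at h2
        cases h2
      | some t0 =>
        simp only [Option.map_some, Option.getD_some]
        exact insert_lift k D gl (String.singleton c) (some (t0 ++ [PySem.Str.slice s (some 1) none]))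
          hl (GOK_char c _) hD

theorem inner_sim (items : List String) (k : String) (D : List (String × List String))
    (g : PySem.Dict String (Option (List String))) (hg : GInv g)
    (hD : ∀ p ∈ D, ¬ k.toList <+: p.1.toList) :
    items.foldl (pySplitItem k) (PySem.Dict.mk (D ++ g.items.map (liftE k)))
      = PySem.Dict.mk (D ++ (items.foldl bgStep g).items.map (liftE k)) := by
  induction items generalizing g with
  | nil => rfl
  | cons s items ih =>
    simp only [List.foldl_cons]
    rw [bgStep_sim k s D g hg hD]
    exact ih (bgStep g s) (GOK_bgStep s hg)

-- ---------- the pass ----------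
theorem pop_head (k : String) (items : List String) (rest : List (String × List String))
    (h : ∀ p ∈ rest, p.1 ≠ k) :
    (PySem.Dict.mk ((k, items) :: rest)).pop? k = some (items, PySem.Dict.mk rest) := by
  unfold PySem.Dict.pop?
  rw [PySem.Dict.get?_mk_cons]
  simp only [beq_self_eq_true, if_true, Option.map_some]
  unfold PySem.Dict.erase
  congr 2
  simp only [PySem.Dict.mk.injEq, List.filter_cons]
  have : (!(k == k)) = false := by simp
  rw [this]
  simp only [Bool.false_eq_true, if_false]
  exact List.filter_eq_self.mpr (fun p hp => by simp [h p hp])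

theorem insert_append_fresh {ν : Type} (l : List (String × ν)) (k : String) (v : ν)
    (h : ∀ p ∈ l, p.1 ≠ k) :
    (PySem.Dict.mk l).insert k v = PySem.Dict.mk (l ++ [(k, v)]) := by
  unfold PySem.Dict.insert
  have hc : (PySem.Dict.mk l).contains k = false := by
    unfold PySem.Dict.contains
    exact List.any_eq_false.mpr (fun p hp => by simp [h p hp])
  rw [hc]
  simp

theorem expand_key_shape {K : String} {e : String × List String}
    (h : K ∈ keysOf (expandItems e)) :
    K = e.1 ∨ (1 < e.2.length ∧ e.1.toList <+: K.toList
               ∧ K.toList.length = e.1.toList.length + 1) := by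
  unfold expandItems at h
  by_cases hlen : e.2.length < 2
  · rw [if_pos hlen] at h
    simp [keysOf] at h
    exact Or.inl h
  · rw [if_neg hlen] at h
    unfold keysOf at h
    rw [List.map_map] at h
    rcases List.mem_map.mp h with ⟨p, hp, hK⟩
    have hgok : GOK p := buildGroups_GInv e.2 p hp
    cases hp2 : p.2 with
    | none =>
      left
      rw [← hK]
      simp [liftE, hp2]
    | some t =>
      right
      have hc : p.1.toList.length = 1 := hgok.2 (by rw [hp2]; simp)
      refine ⟨by omega, ?_, ?_⟩
      · rw [← hK]
        simp only [Function.comp, liftE, hp2]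
        exact str_prefix_append e.1 p.1
      · rw [← hK]
        simp only [Function.comp, liftE, hp2]
        rw [append_toList, List.length_append, hc]

theorem expand_key_prefix {K : String} {e : String × List String}
    (h : K ∈ keysOf (expandItems e)) : e.1.toList <+: K.toList := by
  rcases expand_key_shape h with h1 | ⟨_, h2, _⟩
  · rw [h1]
  · exact h2

theorem keysOf_cons (e : String × List String) (l : List (String × List String)) :
    keysOf (e :: l) = e.1 :: keysOf l := rfl

theorem expand_small {e : String × List String} (h : e.2.length < 2) :
    expandItems e = [e] := by
  unfold expandItems
  rw [if_pos h]

theorem pass_eq : ∀ (pending done : List (String × List String)), OInv pending done →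
    ((pending.map Prod.fst).foldl pyProcessKey (PySem.Dict.mk (pending ++ done)))
      = PySem.Dict.mk (done ++ pending.flatMap expandItems) := by
  intro pending
  induction pending with
  | nil => intro done _; simp
  | cons e rest ih =>
    intro done hInv
    obtain ⟨hnd, hdis, h3⟩ := hInv
    obtain ⟨k, items⟩ := e
    have hndk : k ∉ keysOf rest := by
      unfold keysOf at hnd ⊢
      rw [List.map_cons, List.nodup_cons] at hnd
      exact hnd.1
    have hndr : (keysOf rest).Nodup := by
      unfold keysOf at hnd ⊢
      rw [List.map_cons, List.nodup_cons] at hnd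
      exact hnd.2
    have hfresh : ∀ p ∈ rest ++ done, p.1 ≠ k := by
      intro p hp
      rcases List.mem_append.mp hp with hp1 | hp1
      · exact fun hx => hndk (by rw [← hx]; exact List.mem_map_of_mem hp1)
      · exact fun hx => (hdis (k, items) (by simp) p hp1) hx.symm
    rw [List.map_cons, List.foldl_cons]
    have hstep : pyProcessKey (PySem.Dict.mk ((k, items) :: rest ++ done)) k
        = (if items.length < 2
            then (PySem.Dict.mk (rest ++ done)).insert k items
            else items.foldl (pySplitItem k) (PySem.Dict.mk (rest ++ done))) := by
      unfold pyProcessKey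
      rw [List.cons_append, pop_head k items (rest ++ done) hfresh]
    rw [hstep]
    by_cases hsmall : items.length < 2
    · rw [if_pos hsmall, insert_append_fresh (rest ++ done) k items hfresh]
      have hinv' : OInv rest (done ++ [(k, items)]) := by
        refine ⟨hndr, ?_, ?_⟩
        · intro e' he' p hp
          rcases List.mem_append.mp hp with hp1 | hp1
          · exact hdis e' (by simp [he']) p hp1
          · have hpk : p = (k, items) := by simpa using hp1
            rw [hpk]
            intro hx
            have hx' : e'.1 = k := hx
            exact hndk (by rw [← hx']; exact List.mem_map_of_mem he')
        · intro e' he' hm K hK hpre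
          apply h3 e' (by simp [he']) hm K _ hpre
          rcases hK with hK | hK
          · exact Or.inl (by unfold keysOf at hK ⊢; simp [hK])
          · unfold keysOf at hK
            rw [List.map_append] at hK
            rcases List.mem_append.mp hK with hK1 | hK1
            · exact Or.inr hK1
            · have : K = k := by simpa using hK1
              exact Or.inl (by unfold keysOf; simp [this])
      have := ih (done ++ [(k, items)]) hinv'
      rw [← List.append_assoc] at this
      rw [this, List.flatMap_cons, expand_small hsmall, ← List.append_assoc]
    · rw [if_neg hsmall]
      have hmulti : 1 < items.length := by omega
      have hD : ∀ p ∈ rest ++ done, ¬ k.toList <+: p.1.toList := by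
        intro p hp hpre
        have hkey : p.1 ∈ keysOf (((k, items)) :: rest) ∨ p.1 ∈ keysOf done := by
          rcases List.mem_append.mp hp with hp1 | hp1
          · exact Or.inl (by rw [keysOf_cons]; exact List.mem_cons_of_mem _ (List.mem_map_of_mem hp1))
          · exact Or.inr (List.mem_map_of_mem hp1)
        have := h3 (k, items) (by simp) hmulti p.1 hkey hpre
        exact hfresh p hp this
      have hsim := inner_sim items k (rest ++ done) PySem.Dict.empty
        (fun p hp => by simp [PySem.Dict.empty] at hp) hD
      rw [show PySem.Dict.mk (rest ++ done ++ (PySem.Dict.empty :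
            PySem.Dict String (Option (List String))).items.map (liftE k))
          = PySem.Dict.mk (rest ++ done) by simp [PySem.Dict.empty]] at hsim
      rw [hsim]
      have hE : (items.foldl bgStep PySem.Dict.empty).items.map (liftE k)
          = expandItems (k, items) := by
        unfold expandItems buildGroups
        rw [if_neg hsmall]
      rw [hE]
      have hinv' : OInv rest (done ++ expandItems (k, items)) := by
        refine ⟨hndr, ?_, ?_⟩
        · intro e' he' p hp
          rcases List.mem_append.mp hp with hp1 | hp1
          · exact hdis e' (by simp [he']) p hp1
          · intro hx
            have hpre : k.toList <+: e'.1.toList := by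
              rw [hx]
              exact expand_key_prefix (List.mem_map_of_mem hp1)
            have h5 : e'.1 = k := h3 (k, items) (by simp) hmulti e'.1
              (Or.inl (by rw [keysOf_cons]; exact List.mem_cons_of_mem _ (List.mem_map_of_mem he'))) hpre
            exact hndk (by rw [← h5]; exact List.mem_map_of_mem he')
        · intro e' he' hm K hK hpre
          rcases hK with hK | hK
          · exact h3 e' (by simp [he']) hm K
              (Or.inl (by unfold keysOf at hK ⊢; simp [hK])) hpre
          · unfold keysOf at hK
            rw [List.map_append] at hK
            rcases List.mem_append.mp hK with hK1 | hK1
            · exact h3 e' (by simp [he']) hm K (Or.inr hK1) hpre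
            · exfalso
              have hkK : k.toList <+: K.toList := expand_key_prefix hK1
              have he'K : e'.1.toList <+: K.toList := hpre
              have he'mem : e'.1 ∈ keysOf ((k, items) :: rest) := by
                rw [keysOf_cons]
                exact List.mem_cons_of_mem _ (List.mem_map_of_mem he')
              have hne : e'.1 ≠ k := by
                intro hx
                exact hndk (by rw [← hx]; exact List.mem_map_of_mem he')
              rcases List.prefix_or_prefix_of_prefix he'K hkK with hc | hc
              · have := h3 e' (by simp [he']) hm k
                  (Or.inl (by rw [keysOf_cons]; simp)) hc
                exact hne this.symm
              · have := h3 (k, items) (by simp) hmulti e'.1 (Or.inl he'mem) hc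
                exact hne this
      have := ih (done ++ expandItems (k, items)) hinv'
      rw [← List.append_assoc] at this
      rw [this, List.flatMap_cons, ← List.append_assoc]

-- ---------- invariant after a pass ----------
theorem key_nodup_eq {α ν : Type} {l : List (α × ν)} (hn : (l.map Prod.fst).Nodup)
    {p q : α × ν} (hp : p ∈ l) (hq : q ∈ l) (h : p.1 = q.1) : p = q := by
  induction l with
  | nil => cases hp
  | cons a l ih =>
    rw [List.map_cons, List.nodup_cons] at hn
    rcases List.mem_cons.mp hp with hp1 | hp1 <;> rcases List.mem_cons.mp hq with hq1 | hq1
    · rw [hp1, hq1]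
    · exfalso
      have hm : p.1 ∈ l.map Prod.fst := by rw [h]; exact List.mem_map_of_mem hq1
      rw [hp1] at hm
      exact hn.1 hm
    · exfalso
      have hm : q.1 ∈ l.map Prod.fst := by rw [← h]; exact List.mem_map_of_mem hp1
      rw [hq1] at hm
      exact hn.1 hm
    · exact ih hn.2 hp1 hq1

theorem keysOf_append (a b : List (String × List String)) :
    keysOf (a ++ b) = keysOf a ++ keysOf b := by
  unfold keysOf
  rw [List.map_append]

theorem keysOf_flatMap_mem {K : String} {l : List (String × List String)}
    (h : K ∈ keysOf (l.flatMap expandItems)) : ∃ e ∈ l, K ∈ keysOf (expandItems e) := by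
  induction l with
  | nil => simp [keysOf] at h
  | cons e rest ih =>
    rw [List.flatMap_cons, keysOf_append] at h
    rcases List.mem_append.mp h with h1 | h1
    · exact ⟨e, by simp, h1⟩
    · rcases ih h1 with ⟨e', he', hK⟩
      exact ⟨e', by simp [he'], hK⟩

theorem expand_nodup (e : String × List String) : (keysOf (expandItems e)).Nodup := by
  by_cases h : e.2.length < 2
  · rw [expand_small h]
    simp [keysOf]
  · unfold expandItems
    rw [if_neg h]
    have hnd := buildGroups_nodup e.2
    have hginv := buildGroups_GInv e.2
    unfold keysOf
    rw [List.map_map]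
    have hl : (buildGroups e.2).items.Nodup := List.Nodup.of_map _ hnd
    exact List.Nodup.map_on
      (fun p hp q hq heq =>
        key_nodup_eq hnd hp hq ((lift_key_eq_iff e.1 p q (hginv p hp) (hginv q hq)).mp heq))
      hl

theorem OInv_tail {e : String × List String} {rest : List (String × List String)}
    (h : OInv (e :: rest) []) : OInv rest [] := by
  obtain ⟨hnd, _, h3⟩ := h
  refine ⟨?_, by simp, ?_⟩
  · rw [keysOf_cons, List.nodup_cons] at hnd
    exact hnd.2
  · intro e' he' hm K hK hpre
    apply h3 e' (by simp [he']) hm K ?_ hpre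
    rcases hK with hK | hK
    · exact Or.inl (by rw [keysOf_cons]; exact List.mem_cons_of_mem _ hK)
    · exact absurd hK (by simp [keysOf])

theorem expand_entry_multi {e ê : String × List String}
    (hm : ê ∈ expandItems e) (hmul : 1 < ê.2.length) :
    1 < e.2.length ∧ e.1.toList <+: ê.1.toList
      ∧ ê.1.toList.length = e.1.toList.length + 1 := by
  by_cases h : e.2.length < 2
  · rw [expand_small h] at hm
    have he : ê = e := by simpa using hm
    rw [he] at hmul
    omega
  · unfold expandItems at hm
    rw [if_neg h] at hm
    rcases List.mem_map.mp hm with ⟨p, hp, hlift⟩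
    have hgok := buildGroups_GInv e.2 p hp
    cases hp2 : p.2 with
    | none =>
      exfalso
      have h2 : ê.2 = [""] := by rw [← hlift]; simp [liftE, hp2]
      rw [h2] at hmul
      simp at hmul
    | some t =>
      have hc : p.1.toList.length = 1 := hgok.2 (by rw [hp2]; simp)
      have h1 : ê.1 = e.1 ++ p.1 := by rw [← hlift]; simp [liftE, hp2]
      refine ⟨by omega, ?_, ?_⟩
      · rw [h1]
        exact str_prefix_append e.1 p.1
      · rw [h1, append_toList, List.length_append, hc]

theorem expand_flat_nodup : ∀ pending : List (String × List String), OInv pending [] →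
    (keysOf (pending.flatMap expandItems)).Nodup := by
  intro pending
  induction pending with
  | nil => intro _; simp [keysOf]
  | cons e rest ih =>
    intro h
    obtain ⟨hnd, hd2, h3⟩ := h
    rw [List.flatMap_cons, keysOf_append, List.nodup_append]
    have hndk : e.1 ∉ keysOf rest := by
      rw [keysOf_cons, List.nodup_cons] at hnd
      exact hnd.1
    refine ⟨expand_nodup e, ih (OInv_tail ⟨hnd, hd2, h3⟩), ?_⟩
    intro K hK1 K' hK2a heq
    rw [← heq] at hK2a
    exfalso
    rcases keysOf_flatMap_mem hK2a with ⟨e', he', hK2'⟩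
    have he'r : e'.1 ∈ keysOf rest := List.mem_map_of_mem he'
    rcases expand_key_shape hK1 with hs | ⟨hm, hp, hl⟩ <;>
      rcases expand_key_shape hK2' with hs' | ⟨hm', hp', hl'⟩
    · have heq2 : e.1 = e'.1 := by rw [← hs, hs']
      exact hndk (by rw [heq2]; exact he'r)
    · have hKmem : K ∈ keysOf (e :: rest) := by rw [hs, keysOf_cons]; simp
      have hKe' : K = e'.1 := h3 e' (by simp [he']) hm' K (Or.inl hKmem) hp'
      rw [hKe'] at hl'
      omega
    · have hKmem : K ∈ keysOf (e :: rest) := by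
        rw [keysOf_cons]
        exact List.mem_cons_of_mem _ (by rw [hs']; exact he'r)
      have hKe : K = e.1 := h3 e (by simp) hm K (Or.inl hKmem) hp
      rw [hKe] at hl
      omega
    · have hlen : e.1.toList.length = e'.1.toList.length := by omega
      have heq2 : e.1.toList = e'.1.toList := by
        rcases List.prefix_or_prefix_of_prefix hp hp' with hc | hc
        · exact List.IsPrefix.eq_of_length hc hlen
        · exact (List.IsPrefix.eq_of_length hc (by omega)).symm
      exact hndk (by rw [str_toList_eq heq2]; exact he'r)

theorem OInv_expand (pending : List (String × List String)) (h : OInv pending []) :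
    OInv (pending.flatMap expandItems) [] := by
  refine ⟨expand_flat_nodup pending h, by simp, ?_⟩
  intro ê hê hm K hK hpre
  obtain ⟨hnd, _, h3⟩ := h
  rcases List.mem_flatMap.mp hê with ⟨e, he, hêe⟩
  rcases hK with hK | hK
  · rcases keysOf_flatMap_mem hK with ⟨e', he', hK'⟩
    obtain ⟨hme, hpe, hle⟩ := expand_entry_multi hêe hm
    have hek : e.1.toList <+: K.toList := hpe.trans hpre
    rcases expand_key_shape hK' with hs' | ⟨hm', hp', hl'⟩
    · have he'key : K ∈ keysOf pending := by
        rw [hs']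
        exact List.mem_map_of_mem he'
      have hKe : K = e.1 := h3 e he hme K (Or.inl he'key) hek
      exfalso
      have hlen := List.IsPrefix.length_le hpre
      rw [hKe] at hlen
      omega
    · have heq : e.1.toList = e'.1.toList := by
        rcases List.prefix_or_prefix_of_prefix hek hp' with hc | hc
        · have h4 : e'.1 = e.1 :=
            h3 e he hme e'.1 (Or.inl (List.mem_map_of_mem he')) hc
          rw [h4]
        · have h4 : e.1 = e'.1 :=
            h3 e' he' hm' e.1 (Or.inl (List.mem_map_of_mem he)) hc
          rw [h4]
      have hlen : ê.1.toList.length = K.toList.length := by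
        have := congrArg List.length heq
        omega
      exact (str_toList_eq (List.IsPrefix.eq_of_length hpre hlen)).symm
  · exact absurd hK (by simp [keysOf])

-- ---------- the measure ----------
theorem insert_items_cons {ν : Type} (p : String × ν) (l : List (String × ν))
    (q : String) (v : ν) (hpq : p.1 ≠ q) :
    ((PySem.Dict.mk (p :: l)).insert q v).items
      = p :: ((PySem.Dict.mk l).insert q v).items := by
  unfold PySem.Dict.insert PySem.Dict.contains
  have hb : (p.1 == q) = false := beq_eq_false_iff_ne.mpr hpq
  simp only [List.any_cons, hb, Bool.false_or]
  by_cases hany : l.any (fun r => r.1 == q) = true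
  · rw [if_pos hany, if_pos hany]
    rw [List.map_cons, hb]
    simp
  · rw [if_neg hany, if_neg hany]
    simp

theorem accSum_insert_found (l : List (String × Option (List String)))
    (hn : (l.map Prod.fst).Nodup) (q : String) (w v : Option (List String))
    (hget : (PySem.Dict.mk l).get? q = some w) :
    accSumL ((PySem.Dict.mk l).insert q v).items + valOf w = accSumL l + valOf v := by
  induction l with
  | nil => simp [PySem.Dict.get?] at hget
  | cons p l ih =>
    rw [List.map_cons, List.nodup_cons] at hn
    rw [get?_mk_cons'] at hget
    by_cases hpq : p.1 = q
    · have hb : (p.1 == q) = true := beq_iff_eq.mpr hpq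
      rw [hb] at hget
      simp only [if_true] at hget
      have hw : w = p.2 := by injection hget with h'; rw [h']
      have hc : (PySem.Dict.mk (p :: l)).contains q = true := by
        unfold PySem.Dict.contains
        simp [hb]
      rw [PySem.Dict.items_insert, hc]
      simp only [if_true]
      rw [List.map_cons, hb]
      simp only [if_true]
      have hrest : ∀ r ∈ l, r.1 ≠ q := by
        intro r hr hrq
        exact hn.1 (by rw [← hpq] at hrq; rw [← hrq]; exact List.mem_map_of_mem hr)
      rw [map_replace_id l q v hrest, hw]
      simp [accSumL]
      omega
    · have hb : (p.1 == q) = false := beq_eq_false_iff_ne.mpr hpq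
      rw [hb] at hget
      simp only [Bool.false_eq_true, if_false] at hget
      rw [insert_items_cons p l q v hpq]
      have := ih hn.2 hget
      simp [accSumL] at this ⊢
      omega

theorem accSum_insert_new (l : List (String × Option (List String)))
    (q : String) (v : Option (List String))
    (hget : (PySem.Dict.mk l).get? q = none) :
    accSumL ((PySem.Dict.mk l).insert q v).items = accSumL l + valOf v := by
  have hc : (PySem.Dict.mk l).contains q = false := by
    rw [PySem.Dict.contains_eq_isSome_get?, hget]
    rfl
  rw [PySem.Dict.items_insert, hc]
  simp only [Bool.false_eq_true, if_false]
  simp [accSumL]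

theorem bgStep_acc (g : PySem.Dict String (Option (List String))) (s : String)
    (hn : (g.items.map Prod.fst).Nodup) :
    accSumL (bgStep g s).items ≤ accSumL g.items + s.toList.length := by
  obtain ⟨l⟩ := g
  cases hget : PySem.Str.pyGet? s 0 with
  | none =>
    simp only [bgStep, hget]
    cases hge : (PySem.Dict.mk l).get? "" with
    | some w =>
      have h1 := accSum_insert_found l hn "" w none hge
      have h2 : valOf (none : Option (List String)) = 0 := rfl
      omega
    | none =>
      have h1 := accSum_insert_new l "" none hge
      have h2 : valOf (none : Option (List String)) = 0 := rfl
      omega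
  | some c =>
    have hne : s.toList ≠ [] := by
      rw [pyGet0_eq] at hget
      intro hnil
      rw [hnil] at hget
      simp at hget
    have hlen : 1 ≤ s.toList.length := by
      cases hx : s.toList with
      | nil => exact absurd hx hne
      | cons a r => simp
    have htl : (PySem.Str.slice s (some 1) none).toList.length = s.toList.length - 1 := by
      rw [tail_toList, List.length_tail]
    have hsingle : valOf (some [PySem.Str.slice s (some 1) none]) = s.toList.length := by
      show sizeSum [PySem.Str.slice s (some 1) none] = s.toList.length
      rw [sizeSum_singleton]
      omega
    simp only [bgStep, hget]
    cases hge : (PySem.Dict.mk l).get? (String.singleton c) with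
    | none =>
      have h1 := accSum_insert_new l (String.singleton c) (some [PySem.Str.slice s (some 1) none]) hge
      show accSumL (((PySem.Dict.mk l).insert (String.singleton c)
        (some [PySem.Str.slice s (some 1) none])).items) ≤ accSumL l + s.toList.length
      omega
    | some t? =>
      cases t? with
      | none =>
        have h1 := accSum_insert_found l hn (String.singleton c) none (some [PySem.Str.slice s (some 1) none]) hge
        have h2 : valOf (none : Option (List String)) = 0 := rfl
        show accSumL (((PySem.Dict.mk l).insert (String.singleton c)
          (some [PySem.Str.slice s (some 1) none])).items) ≤ accSumL l + s.toList.length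
        omega
      | some t0 =>
        have h1 := accSum_insert_found l hn (String.singleton c) (some t0)
          (some (t0 ++ [PySem.Str.slice s (some 1) none])) hge
        have h2 : valOf (some (t0 ++ [PySem.Str.slice s (some 1) none]))
            = valOf (some t0) + s.toList.length := by
          show sizeSum (t0 ++ [PySem.Str.slice s (some 1) none]) = sizeSum t0 + s.toList.length
          rw [sizeSum_append_singleton]
          omega
        show accSumL (((PySem.Dict.mk l).insert (String.singleton c)
          (some (t0 ++ [PySem.Str.slice s (some 1) none]))).items) ≤ accSumL l + s.toList.length
        omega

theorem accSum_buildGroups (items : List String) :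
    accSumL (buildGroups items).items ≤ (items.map (fun s => s.toList.length)).sum := by
  have main : ∀ (l : List String) (g : PySem.Dict String (Option (List String))),
      (g.items.map Prod.fst).Nodup →
      accSumL (l.foldl bgStep g).items
        ≤ accSumL g.items + (l.map (fun s => s.toList.length)).sum := by
    intro l
    induction l with
    | nil => intro g _; simp
    | cons s l ih =>
      intro g hn
      rw [List.foldl_cons]
      have hstep := bgStep_acc g s hn
      have hnn : ((bgStep g s).items.map Prod.fst).Nodup := bgStep_nodup s hn
      have := ih (bgStep g s) hnn
      rw [List.map_cons, List.sum_cons]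
      omega
  have := main items PySem.Dict.empty (by simp [PySem.Dict.empty])
  simpa [accSumL, PySem.Dict.empty] using this

theorem muE_lift_le (k : String) (p : String × Option (List String)) :
    muE (liftE k p) ≤ valOf p.2 := by
  cases hp : p.2 with
  | none => simp [muE, liftE, hp, valOf]
  | some t =>
    simp only [muE, liftE, hp, valOf, Option.getD_some]
    split <;> omega

theorem muL_cons (e : String × List String) (l : List (String × List String)) :
    muL (e :: l) = muE e + muL l := by
  simp [muL]

theorem muL_append (a b : List (String × List String)) :
    muL (a ++ b) = muL a + muL b := by
  simp [muL]

theorem muL_expand_lt (e : String × List String) (h : 1 < e.2.length) :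
    muL (expandItems e) < muE e := by
  unfold expandItems
  rw [if_neg (by omega)]
  have h1 : muL ((buildGroups e.2).items.map (liftE e.1))
      ≤ accSumL (buildGroups e.2).items := by
    unfold muL accSumL
    rw [List.map_map]
    exact List.sum_le_sum (fun p _ => muE_lift_le e.1 p)
  have h2 := accSum_buildGroups e.2
  have h3 : e.2 ≠ [] := by
    intro hnil
    rw [hnil] at h
    simp at h
  have h4 := sizeSum_pos h3
  have h5 : muE e = sizeSum e.2 := if_pos h
  omega

theorem muL_expand_le (e : String × List String) :
    muL (expandItems e) ≤ muE e := by
  by_cases h : 1 < e.2.length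
  · exact le_of_lt (muL_expand_lt e h)
  · unfold expandItems
    rw [if_pos (by omega)]
    rw [muL_cons]
    simp [muL]

theorem muL_flatMap_le (l : List (String × List String)) :
    muL (l.flatMap expandItems) ≤ muL l := by
  induction l with
  | nil => simp [muL]
  | cons e l ih =>
    rw [List.flatMap_cons, muL_append, muL_cons]
    have := muL_expand_le e
    omega

theorem muL_flatMap (pending : List (String × List String))
    (hex : ∃ e ∈ pending, 1 < e.2.length) :
    muL (pending.flatMap expandItems) < muL pending := by
  induction pending with
  | nil => rcases hex with ⟨e, he, _⟩; cases he
  | cons e rest ih =>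
    rw [List.flatMap_cons, muL_append, muL_cons]
    rcases hex with ⟨e', he', hm⟩
    rcases List.mem_cons.mp he' with he1 | he1
    · have h1 : muL (expandItems e) < muE e := muL_expand_lt e (by rw [← he1] at *; exact hm)
      have h2 := muL_flatMap_le rest
      omega
    · have h1 := muL_expand_le e
      have h2 := ih ⟨e', he1, hm⟩
      omega

-- ---------- walk characterisation ----------
theorem walk_small (pre : String) (items : List String) (h : items.length < 2) :
    walk pre items = [emit1 (pre, items)] := by
  unfold walk
  rw [dif_pos h]
  cases items with
  | nil => rfl
  | cons s rest =>
    cases hget : PySem.Str.pyGet? s 0 with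
    | some c => simp only [hget]; simp [emit1]
    | none =>
      have hs := pyGet0_none hget
      subst hs
      simp only [hget]
      simp [emit1, String.append_empty]

theorem flatMap_congr_mem {α β : Type} {l : List α} {f g : α → List β}
    (h : ∀ a ∈ l, f a = g a) : l.flatMap f = l.flatMap g := by
  induction l with
  | nil => rfl
  | cons a l ih =>
    rw [List.flatMap_cons, List.flatMap_cons, h a (by simp),
      ih (fun a' ha' => h a' (by simp [ha']))]

theorem flatMap_flatMap (l : List (String × List String)) :
    (l.flatMap expandItems).flatMap (fun e => walk e.1 e.2)
      = l.flatMap (fun e => (expandItems e).flatMap (fun e' => walk e'.1 e'.2)) := by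
  induction l with
  | nil => rfl
  | cons e rest ih =>
    rw [List.flatMap_cons, List.flatMap_cons, List.flatMap_append, ih]

def walkArm (k : String) (p : String × Option (List String)) : List (String × String) :=
  match p with
  | (_, none) => [(k, k)]
  | (c, some tails) => walk (k ++ c) tails

theorem walk_term (k : String) : walk k [""] = [(k, k)] := by
  rw [walk_small k [""] (by simp)]
  have : emit1 (k, [""]) = (k ++ "", k) := rfl
  rw [this, String.append_empty]

theorem walk_expand (e : String × List String) :
    (expandItems e).flatMap (fun e' => walk e'.1 e'.2) = walk e.1 e.2 := by
  obtain ⟨k, items⟩ := e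
  by_cases h : items.length < 2
  · rw [expand_small h]
    simp
  · simp only [expandItems]
    rw [if_neg h]
    conv_rhs => rw [walk]
    rw [dif_neg h]
    have hfun : (fun (pairs : List (String × String))
          (ct : {x // x ∈ (buildGroups items).items}) =>
        match ct with
        | ⟨(_, none), _⟩ => pairs ++ [(k, k)]
        | ⟨(c, some tails), _⟩ => pairs ++ walk (k ++ c) tails)
      = (fun pairs ct => pairs ++ walkArm k ct.1) := by
      funext pairs ct
      rcases ct with ⟨⟨c, t?⟩, hmem⟩
      cases t? <;> rfl
    rw [hfun]
    rw [show ((buildGroups items).items.attach.foldl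
          (fun pairs ct => pairs ++ walkArm k ct.1) ([] : List (String × String)))
        = (buildGroups items).items.foldl (fun pairs x => pairs ++ walkArm k x) []
      from List.foldl_attach (l := (buildGroups items).items)
        (f := fun pairs x => pairs ++ walkArm k x) (b := [])]
    rw [PySem.List.foldl_append_eq_flatMap, List.nil_append, List.flatMap_map]
    apply flatMap_congr_mem
    intro p hp
    obtain ⟨c, t?⟩ := p
    cases t? with
    | none => exact walk_term k
    | some tails => rfl

-- ---------- the loop ----------
theorem map_emit_small (l : List (String × List String)) (h : ∀ e ∈ l, e.2.length < 2) :
    l.map emit1 = l.flatMap (fun e => walk e.1 e.2) := by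
  induction l with
  | nil => rfl
  | cons e rest ih =>
    rw [List.map_cons, List.flatMap_cons, walk_small e.1 e.2 (h e (by simp)),
      ih (fun e' he' => h e' (by simp [he']))]
    rfl

theorem main_loop : ∀ (fuel : Nat) (pending : List (String × List String)),
    OInv pending [] → muL pending < fuel →
    ((pyLoop fuel (PySem.Dict.mk pending)).items.map emit1)
      = pending.flatMap (fun e => walk e.1 e.2) := by
  intro fuel
  induction fuel with
  | zero => intro pending _ hmu; omega
  | succ f ih =>
    intro pending hInv hmu
    simp only [pyLoop]
    by_cases hany : (PySem.Dict.mk pending).values.any (fun v => 1 < v.length) = true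
    · rw [if_pos hany]
      have hpass : pyPass (PySem.Dict.mk pending)
          = PySem.Dict.mk (pending.flatMap expandItems) := by
        have h0 := pass_eq pending [] hInv
        rw [List.append_nil, List.nil_append] at h0
        exact h0
      rw [hpass]
      have hmulti : ∃ e ∈ pending, 1 < e.2.length := by
        rcases List.any_eq_true.mp hany with ⟨v, hv, hlen⟩
        rcases List.mem_map.mp hv with ⟨e, he, hev⟩
        refine ⟨e, he, ?_⟩
        rw [hev]
        simpa using hlen
      have h1 := muL_flatMap pending hmulti
      have h2 := ih (pending.flatMap expandItems) (OInv_expand pending hInv) (by omega)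
      rw [h2, flatMap_flatMap]
      exact flatMap_congr_mem (fun e _ => walk_expand e)
    · rw [if_neg hany]
      have hsmall : ∀ e ∈ pending, e.2.length < 2 := by
        intro e he
        by_contra hx
        apply hany
        refine List.any_eq_true.mpr ⟨e.2, List.mem_map_of_mem he, by simpa using (by omega : 1 < e.2.length)⟩
      exact map_emit_small pending hsmall

theorem pyFuel_gen (strs : List String) : ∀ n : Nat,
    strs.foldl (fun n s => n + s.toList.length + 1) n = n + sizeSum strs := by
  induction strs with
  | nil => intro n; simp [sizeSum]
  | cons s strs ih =>
    intro n
    rw [List.foldl_cons, ih, sizeSum_cons]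
    omega

theorem pyFuel_eq (strs : List String) : pyFuel strs = sizeSum strs + 1 := by
  unfold pyFuel
  rw [pyFuel_gen]
  omega

theorem finish_fold (l : List (String × List String)) (r : PySem.Dict String String) :
    l.foldl (fun r kv =>
      match kv.2 with
      | [] => r.insert kv.1 kv.1
      | v0 :: _ => r.insert (kv.1 ++ v0) kv.1) r
    = (l.map emit1).foldl (fun r p => r.insert p.1 p.2) r := by
  induction l generalizing r with
  | nil => rfl
  | cons kv l ih =>
    cases hkv : kv.2 <;> simp [emit1, hkv, ih]

-- ===== VERDICT (by name: the statement is the Claim_ definition above) =====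
theorem lto_dict_spec : Claim_equal_lto_dict := by
  intro strings _
  show lto_dict strings = lto_dict_alt strings
  have hInv : OInv [("", (PySem.Set.ofList strings : List String))] [] := by
    refine ⟨by simp [keysOf], by simp, ?_⟩
    intro e he hm K hK hpre
    have he' : e = ("", (PySem.Set.ofList strings : List String)) := by simpa using he
    rcases hK with hK | hK
    · have hK' : K = "" := by simpa [keysOf] using hK
      rw [hK', he']
    · exact absurd hK (by simp [keysOf])
  have hmu : muL [("", (PySem.Set.ofList strings : List String))]
      < pyFuel (PySem.Set.ofList strings) := by
    rw [pyFuel_eq]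
    have h1 : (if 1 < (PySem.Set.ofList strings : List String).length
          then sizeSum (PySem.Set.ofList strings) else 0)
        ≤ sizeSum (PySem.Set.ofList strings) := by
      split <;> omega
    have h2 : muL [("", (PySem.Set.ofList strings : List String))]
        = (if 1 < (PySem.Set.ofList strings : List String).length
          then sizeSum (PySem.Set.ofList strings) else 0) := by
      simp [muL, muE]
    omega
  have hmain := main_loop (pyFuel (PySem.Set.ofList strings))
    [("", (PySem.Set.ofList strings : List String))] hInv hmu
  have hflat : ([("", (PySem.Set.ofList strings : List String))].flatMap
      (fun e => walk e.1 e.2)) = walk "" (PySem.Set.ofList strings) := by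
    simp
  rw [hflat] at hmain
  have hd0 : ((PySem.Dict.empty : PySem.Dict String (List String)).insert
        "" (PySem.Set.ofList strings : List String))
      = PySem.Dict.mk [("", (PySem.Set.ofList strings : List String))] := rfl
  simp only [lto_dict, lto_dict_alt]
  rw [PySem.List.dedup_eq_ofList, hd0, finish_fold, hmain]
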